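-- pv_equiv track=rewrite | github.com/lumicks/pylake | lumicks/pylake/detail/widefield.py | _frame_timestamps_from_exposure_timestamps
-- ===== SOURCE A (Python) =====
-- def _frame_timestamps_from_exposure_timestamps(ts_ranges):
--     """Generate frame timestamp ranges from confocal scans exported with legacy Pylake metadata
--     format.
--
--     For confocal Scans exported with Pylake `<v1.3.2` timestamps contained the start and end time
--     of the exposure, rather than the full frame. This behavior was inconsistent with Bluelake
--     and therefore changed. To be able to load files generated in this way, we need to be able
--     to reconstruct timestamps using only the start timestamp of each frame
--
--     Parameters
--     ----------
--     ts_ranges : list of tuple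
--         Modern timestamp ranges in nanoseconds given by a list of tuples according to the format
--         (start of frame, start of next frame).
--     """
--     frame_ts = [(leading[0], trailing[0]) for leading, trailing in zip(ts_ranges, ts_ranges[1:])]
--     if len(ts_ranges) >= 2:
--         dt = ts_ranges[-1][0] - ts_ranges[-2][0]
--         stop = ts_ranges[-1][0] + dt
--     else:
--         stop = ts_ranges[-1][1]
--     frame_ts.append((ts_ranges[-1][0], stop))
--
--     return frame_ts
-- ===== SOURCE B (Python) =====
-- def _frame_timestamps_from_exposure_timestamps(ts_ranges):
--     def go(cur, rest, prev_start):
--         if rest: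
--             nxt = rest[0]
--             return [(cur[0], nxt[0])] + go(nxt, rest[1:], cur[0])
--         if prev_start is None:
--             return [(cur[0], cur[1])]
--         return [(cur[0], 2 * cur[0] - prev_start)]
--
--     return go(ts_ranges[0], ts_ranges[1:], None)
-- ===== Notes on version B (the rewrite author's own statement) =====
-- stated objective: alternative
-- what changed: B is a single recursive pass over the list carrying the previous frame's start timestamp, emitting each pair as it walks and extrapolating the last stop from the carried start, instead of A's staged zip-with-tail comprehension plus negative-index lookups and a special appended last pair.
import Mathlib
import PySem

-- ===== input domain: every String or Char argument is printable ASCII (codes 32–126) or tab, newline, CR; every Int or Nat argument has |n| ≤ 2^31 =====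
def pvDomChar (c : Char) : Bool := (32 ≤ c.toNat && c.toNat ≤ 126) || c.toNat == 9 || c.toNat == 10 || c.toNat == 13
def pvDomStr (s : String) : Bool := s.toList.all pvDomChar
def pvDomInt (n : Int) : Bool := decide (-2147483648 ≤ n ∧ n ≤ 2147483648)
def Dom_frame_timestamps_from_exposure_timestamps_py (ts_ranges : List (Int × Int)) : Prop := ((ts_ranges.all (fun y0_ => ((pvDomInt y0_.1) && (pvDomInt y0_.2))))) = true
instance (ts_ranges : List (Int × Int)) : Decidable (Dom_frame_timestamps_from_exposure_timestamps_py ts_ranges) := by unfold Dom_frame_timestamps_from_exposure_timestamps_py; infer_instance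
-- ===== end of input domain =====

-- B replaces A's staged "zip with tail, negative-index lookups, append special last pair" by a
-- single recursive walk that carries the previous frame's start and extrapolates the final stop;
-- same O(n) cost, a different decomposition.

-- ===== PORT A =====
-- A: frame_ts = [(leading[0], trailing[0]) for leading, trailing in zip(ts_ranges, ts_ranges[1:])];
--    then append (ts_ranges[-1][0], stop) with stop from the length conditional.
def frame_timestamps_from_exposure_timestamps_py (ts_ranges : List (Int × Int)) : List (Int × Int) :=
  let frame_ts :=
    (List.zip ts_ranges (PySem.List.slice ts_ranges (some 1) none)).map
      (fun lt => (lt.1.1, lt.2.1))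
  match PySem.List.pyGet? ts_ranges (-1) with
  | none => []     -- ts_ranges[-1] raises IndexError (empty input); excluded by Pre_
  | some last =>
    if ts_ranges.length ≥ 2 then
      match PySem.List.pyGet? ts_ranges (-2) with
      | none => []   -- unreachable when length ≥ 2
      | some prev =>
        let dt := last.1 - prev.1
        let stop := last.1 + dt
        frame_ts ++ [(last.1, stop)]
    else
      let stop := last.2
      frame_ts ++ [(last.1, stop)]

-- ===== PORT B =====
-- B: go(cur, rest, prev_start) walks the list once, pairing cur's start with the next start,
--    carrying cur's start as prev_start; at the end it extrapolates 2*cur[0]-prev_start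
--    (or uses cur[1] when there never was a previous frame).
def pvGo (cur : Int × Int) (rest : List (Int × Int)) (prev_start : Option Int) : List (Int × Int) :=
  match rest with
  | nxt :: rs => [(cur.1, nxt.1)] ++ pvGo nxt rs (some cur.1)
  | [] =>
    match prev_start with
    | none => [(cur.1, cur.2)]
    | some p => [(cur.1, 2 * cur.1 - p)]

def frame_timestamps_from_exposure_timestamps_py_alt (ts_ranges : List (Int × Int)) : List (Int × Int) :=
  match PySem.List.pyGet? ts_ranges 0 with
  | none => []     -- ts_ranges[0] raises IndexError (empty input); excluded by Pre_
  | some c => pvGo c (PySem.List.slice ts_ranges (some 1) none) none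

-- ===== PRECONDITION & SPEC =====
-- Pre_ excludes only the empty list, on which both Pythons raise IndexError.
def Pre_frame_timestamps_from_exposure_timestamps_py (ts_ranges : List (Int × Int)) : Prop :=
  ts_ranges ≠ []
instance (ts_ranges : List (Int × Int)) : Decidable (Pre_frame_timestamps_from_exposure_timestamps_py ts_ranges) := by unfold Pre_frame_timestamps_from_exposure_timestamps_py; infer_instance

def pvWitness_frame_timestamps_from_exposure_timestamps_py : (List (Int × Int)) := [(0, 5), (10, 15)]

def Spec_frame_timestamps_from_exposure_timestamps_py (ts_ranges : List (Int × Int)) (out : List (Int × Int)) : Prop := out = frame_timestamps_from_exposure_timestamps_py_alt ts_ranges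
instance (ts_ranges : List (Int × Int)) (out : List (Int × Int)) : Decidable (Spec_frame_timestamps_from_exposure_timestamps_py ts_ranges out) := by unfold Spec_frame_timestamps_from_exposure_timestamps_py; infer_instance

-- ===== CLAIM (what is proved, stated in full; the proofs are below) =====
def Claim_equal_frame_timestamps_from_exposure_timestamps_py : Prop := ∀ (ts_ranges : List (Int × Int)), Dom_frame_timestamps_from_exposure_timestamps_py ts_ranges → Pre_frame_timestamps_from_exposure_timestamps_py ts_ranges → Spec_frame_timestamps_from_exposure_timestamps_py ts_ranges (frame_timestamps_from_exposure_timestamps_py ts_ranges)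

-- ===== LEMMAS AND PROOFS =====

-- Common explicit form both ports are proved equal to (proof-only helper).
def pvForm (ts : List (Int × Int)) : List (Int × Int) :=
  let s := ts.map Prod.fst
  let stop : Int :=
    if 2 ≤ ts.length then 2 * s.getLastD 0 - s.dropLast.getLastD 0
    else (ts.getLastD (0, 0)).2
  List.zip s s.tail ++ [(s.getLastD 0, stop)]

-- A's comprehension over zip(ts, ts[1:]) projects to the zip of the start list with its own tail.
theorem pv_map_zip_tail (ts : List (Int × Int)) :
    (List.zip ts ts.tail).map (fun lt => (lt.1.1, lt.2.1)) =
      List.zip (ts.map Prod.fst) ((ts.map Prod.fst).tail) := by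
  induction ts with
  | nil => simp
  | cons p rest ih =>
    cases rest with
    | nil => simp
    | cons q rs => simpa using ih

theorem pv_getLast?_map_fst (l : List (Int × Int)) :
    (l.map Prod.fst).getLast? = l.getLast?.map Prod.fst := by
  induction l with
  | nil => rfl
  | cons p rest ih =>
    cases rest with
    | nil => rfl
    | cons q rs => simpa using ih

-- bridge: second-to-last start as dropLast-getLastD
theorem pv_dropLast_getLastD (ts : List (Int × Int)) (h : 2 ≤ ts.length) :
    ((ts.map Prod.fst).dropLast).getLastD 0 =
      (ts[ts.length - 2]?.map Prod.fst).getD 0 := by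
  induction ts with
  | nil => simp at h
  | cons a rest ih =>
    cases rest with
    | nil => simp at h
    | cons b rs =>
      cases rs with
      | nil => simp
      | cons c rr =>
        have h2 : 2 ≤ (b :: c :: rr).length := by simp
        have := ih h2
        simp only [List.length_cons] at this ⊢
        have hidx : (a :: b :: c :: rr)[rr.length + 3 - 2]? =
            (b :: c :: rr)[rr.length + 2 - 2]? := by
          have : rr.length + 3 - 2 = (rr.length + 2 - 2) + 1 := by omega
          rw [this]; simp; rfl
        rw [hidx]
        rw [← this]
        simp [List.dropLast_cons_of_ne_nil]

-- B's recursive walker, once a previous start is carried, computes the explicit form.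
theorem pv_go_some (rs : List (Int × Int)) (b : Int × Int) (p : Int) :
    pvGo b rs (some p) =
      List.zip ((b :: rs).map Prod.fst) (((b :: rs).map Prod.fst).tail)
        ++ [(((b :: rs).map Prod.fst).getLastD 0,
             2 * (((b :: rs).map Prod.fst).getLastD 0)
               - ((p :: (b :: rs).map Prod.fst).dropLast.getLastD 0))] := by
  induction rs generalizing b p with
  | nil => simp [pvGo]
  | cons c rr ih =>
    rw [pvGo, ih c b.1]
    cases rr with
    | nil => simp
    | cons d tt => simp [List.dropLast_cons_of_ne_nil]

theorem pv_A (ts : List (Int × Int)) (hpre : ts ≠ []) :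
    frame_timestamps_from_exposure_timestamps_py ts = pvForm ts := by
  simp only [frame_timestamps_from_exposure_timestamps_py, pvForm]
  by_cases hlen : ts.length ≥ 2
  · obtain ⟨last, hlast⟩ := Option.isSome_iff_exists.mp (List.getLast?_isSome.mpr hpre)
    have hl2 : ts.length - 2 < ts.length := by omega
    have hprevget : ts[ts.length - 2]? = some ts[ts.length - 2] := List.getElem?_eq_getElem hl2
    have hlastm : (ts.map Prod.fst).getLast? = some last.1 := by
      rw [pv_getLast?_map_fst, hlast]; rfl
    have hgd : (ts.map Prod.fst).getLastD 0 = last.1 := by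
      rw [List.getLastD_eq_getLast?, hlastm]; rfl
    have hdrop := pv_dropLast_getLastD ts hlen
    rw [hprevget] at hdrop
    simp only [Option.map_some, Option.getD_some] at hdrop
    rw [PySem.List.pyGet?_neg_ofNat ts 2 (by omega) (by omega)]
    simp only [PySem.List.slice_from_one, PySem.List.pyGet?_neg_one, hlast, hprevget,
      hlen, if_pos, pv_map_zip_tail ts, hgd, hdrop]
    have hstop : last.1 + (last.1 - ts[ts.length - 2].1) = 2 * last.1 - ts[ts.length - 2].1 := by
      ring
    rw [hstop]
  · obtain ⟨a, rfl⟩ : ∃ a, ts = [a] := by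
      cases ts with
      | nil => exact absurd rfl hpre
      | cons a rest =>
        cases rest with
        | nil => exact ⟨a, rfl⟩
        | cons q rr => exfalso; exact hlen (by simp)
    simp [PySem.List.slice_from_one, PySem.List.pyGet?_neg_one]

theorem pv_B (ts : List (Int × Int)) (hpre : ts ≠ []) :
    frame_timestamps_from_exposure_timestamps_py_alt ts = pvForm ts := by
  cases ts with
  | nil => exact absurd rfl hpre
  | cons a rest =>
    simp only [frame_timestamps_from_exposure_timestamps_py_alt, PySem.List.slice_from_one]
    cases rest with
    | nil =>
      have h1 : (0:Int) ≤ 0 := le_refl 0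
      simp [pvGo, pvForm, PySem.List.pyGet?, PySem.List.pyIdx?]
    | cons b rs =>
      have h0 : PySem.List.pyGet? (a :: b :: rs) 0 = some a := by
        have hnn : (0:Int) ≤ (rs.length:Int) + 1 := by positivity
        simp [PySem.List.pyGet?, PySem.List.pyIdx?, hnn]
      rw [h0]
      show pvGo a (b :: rs) none = _
      rw [pvGo, pv_go_some rs b a.1]
      simp only [pvForm, List.map_cons, List.length_cons]
      have hlen : 2 ≤ (a :: b :: rs).length := by simp
      cases rs with
      | nil => simp
      | cons c rr => simp [List.dropLast_cons_of_ne_nil]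

theorem pv_main (ts : List (Int × Int)) (hpre : ts ≠ []) :
    frame_timestamps_from_exposure_timestamps_py ts =
      frame_timestamps_from_exposure_timestamps_py_alt ts := by
  rw [pv_A ts hpre, pv_B ts hpre]

-- ===== VERDICT (by name: the statement is the Claim_ definition above) =====
theorem frame_timestamps_from_exposure_timestamps_py_spec : Claim_equal_frame_timestamps_from_exposure_timestamps_py := by
  intro ts _ hpre
  exact pv_main ts hpre
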